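-- pv_equiv track=rewrite | github.com/julwein/hw | homework_01/task_04.py | count_2_lists_element_sums
-- ===== SOURCE A (Python) =====
-- from typing import Dict, List
--
-- def count_2_lists_element_sums(a: List[int], b: List[int]) -> Dict[int, int]:
--     """Count various sums of elements from two lists,
--     one element from each list."""
--     ab_sums_dict = {}
--     for x in a:
--         for y in b:
--             if x + y not in ab_sums_dict:
--                 ab_sums_dict[x + y] = 1
--             else:
--                 ab_sums_dict[x + y] += 1
--     return ab_sums_dict
-- ===== SOURCE B (Python) =====
-- from typing import Dict, List
--
-- def count_2_lists_element_sums(a: List[int], b: List[int]) -> Dict[int, int]: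
--     """Count sums x+y over pairs via value frequencies: iterate distinct
--     values only and add the product of their multiplicities."""
--     ca = {}
--     for x in a:
--         ca[x] = ca.get(x, 0) + 1
--     cb = {}
--     for y in b:
--         cb[y] = cb.get(y, 0) + 1
--     result = {}
--     for va, na in ca.items():
--         for vb, nb in cb.items():
--             s = va + vb
--             result[s] = result.get(s, 0) + na * nb
--     return result
-- ===== Notes on version B (the rewrite author's own statement) =====
-- stated objective: faster
-- what changed: B first builds frequency counters of both lists, then accumulates na*nb per pair of distinct values instead of incrementing by 1 for every raw element pair.
import Mathlib
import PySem

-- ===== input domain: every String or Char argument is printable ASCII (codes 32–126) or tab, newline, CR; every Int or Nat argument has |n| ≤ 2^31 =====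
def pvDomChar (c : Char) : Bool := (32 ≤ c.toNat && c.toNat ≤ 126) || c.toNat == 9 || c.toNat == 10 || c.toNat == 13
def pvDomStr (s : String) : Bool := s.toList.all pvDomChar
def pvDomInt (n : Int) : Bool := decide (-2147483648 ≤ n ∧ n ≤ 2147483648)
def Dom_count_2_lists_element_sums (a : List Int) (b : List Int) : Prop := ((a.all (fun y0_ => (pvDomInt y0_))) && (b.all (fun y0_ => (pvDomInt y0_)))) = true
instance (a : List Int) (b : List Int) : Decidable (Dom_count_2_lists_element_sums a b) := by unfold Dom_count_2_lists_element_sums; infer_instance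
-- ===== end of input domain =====

-- B builds frequency counters of both lists first and adds na*nb per pair of
-- DISTINCT values, instead of incrementing by 1 for every raw element pair.

-- ===== PORT A =====
def count_2_lists_element_sums (a : List Int) (b : List Int) : List (Int × Int) :=
  (a.foldl (fun d x =>
      b.foldl (fun d y =>
        if d.contains (x + y) = false then d.insert (x + y) 1
        else d.insert (x + y) (d.getD (x + y) 0 + 1)) d)
    (PySem.Dict.empty : PySem.Dict Int Int)).items

-- ===== PORT B =====
def count_2_lists_element_sums_alt (a : List Int) (b : List Int) : List (Int × Int) :=
  let ca := a.foldl (fun d x => d.insert x (d.getD x 0 + 1)) (PySem.Dict.empty : PySem.Dict Int Int)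
  let cb := b.foldl (fun d y => d.insert y (d.getD y 0 + 1)) (PySem.Dict.empty : PySem.Dict Int Int)
  let res := ca.items.foldl (fun r p =>
      cb.items.foldl (fun r q =>
        r.insert (p.1 + q.1) (r.getD (p.1 + q.1) 0 + p.2 * q.2)) r)
    (PySem.Dict.empty : PySem.Dict Int Int)
  res.items

-- ===== PRECONDITION & SPEC =====
def Spec_count_2_lists_element_sums (a : List Int) (b : List Int) (out : List (Int × Int)) : Prop := out = count_2_lists_element_sums_alt a b
instance (a : List Int) (b : List Int) (out : List (Int × Int)) : Decidable (Spec_count_2_lists_element_sums a b out) := by unfold Spec_count_2_lists_element_sums; infer_instance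

-- ===== CLAIM (what is proved, stated in full; the proofs are below) =====
def Claim_equal_count_2_lists_element_sums : Prop := ∀ (a : List Int) (b : List Int), Dom_count_2_lists_element_sums a b → Spec_count_2_lists_element_sums a b (count_2_lists_element_sums a b)

-- ===== LEMMAS AND PROOFS =====

-- weighted counting fold: for each pair (k, w) do d[k] = d.get(k, 0) + w
def pvWfold (L : List (Int × Int)) (d : PySem.Dict Int Int) : PySem.Dict Int Int :=
  L.foldl (fun d p => d.insert p.1 (d.getD p.1 0 + p.2)) d

-- total weight a weighted pair list assigns to key s
def pvWsum (L : List (Int × Int)) (s : Int) : Int :=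
  (L.map (fun p => if p.1 = s then p.2 else 0)).sum

-- A's stream: one pair of weight 1 per raw element pair
def pvL1 (a b : List Int) : List (Int × Int) :=
  a.flatMap (fun x => b.map (fun y => (x + y, (1 : Int))))

-- B's stream: one pair of weight count*count per pair of distinct values
def pvL2 (a b : List Int) : List (Int × Int) :=
  (PySem.Set.ofList a).flatMap (fun x =>
    (PySem.Set.ofList b).map (fun y => (x + y, (a.count x : Int) * (b.count y : Int))))

-- the elements of `l` that are not in `sa`, first occurrences only, in order
def pvSeenFilter (sa : List Int) (l : List Int) : List Int :=
  (PySem.Set.ofList l).filter (fun y => !(decide (y ∈ sa)))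

theorem pvFoldlNested {α β : Type} (A : List α) (B : List β) (mk : α → β → Int × Int)
    (d : PySem.Dict Int Int) :
    pvWfold (A.flatMap fun p => B.map (mk p)) d
      = A.foldl (fun d p => B.foldl (fun d q =>
          d.insert (mk p q).1 (d.getD (mk p q).1 0 + (mk p q).2)) d) d := by
  induction A generalizing d with
  | nil => rfl
  | cons p A ih =>
      simp only [List.flatMap_cons, pvWfold, List.foldl_append, List.foldl_map, List.foldl_cons]
      exact ih _

theorem pvA_eq (a b : List Int) :
    count_2_lists_element_sums a b = (pvWfold (pvL1 a b) PySem.Dict.empty).items := by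
  have h : ∀ (d : PySem.Dict Int Int) (x y : Int),
      (if d.contains (x + y) = false then d.insert (x + y) 1
       else d.insert (x + y) (d.getD (x + y) 0 + 1))
        = d.insert (x + y) (d.getD (x + y) 0 + 1) := by
    intro d x y
    by_cases hc : d.contains (x + y) = false
    · simp [hc, PySem.Dict.getD_of_not_contains d 0 hc]
    · simp [hc]
  simp only [count_2_lists_element_sums, h, pvL1,
    pvFoldlNested a b (fun x y => (x + y, (1 : Int)))]

theorem pvB_eq (a b : List Int) :
    count_2_lists_element_sums_alt a b = (pvWfold (pvL2 a b) PySem.Dict.empty).items := by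
  simp only [count_2_lists_element_sums_alt,
    PySem.Dict.foldl_insert_getD_add_one_eq_counter, PySem.Dict.items_counter]
  rw [← pvFoldlNested ((PySem.Set.ofList a).map fun k => (k, (a.count k : Int)))
        ((PySem.Set.ofList b).map fun k => (k, (b.count k : Int)))
        (fun p q => (p.1 + q.1, p.2 * q.2))]
  congr 2
  simp [pvL2, List.flatMap_map, List.map_map, Function.comp_def]

theorem pvWfold_getD (L : List (Int × Int)) (d : PySem.Dict Int Int) (s : Int) :
    (pvWfold L d).getD s 0 = d.getD s 0 + pvWsum L s := by
  induction L generalizing d with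
  | nil => simp [pvWfold, pvWsum]
  | cons p L ih =>
      simp only [pvWfold, List.foldl_cons] at *
      rw [ih]
      by_cases h : p.1 = s
      · simp [pvWsum, h]; ring
      · simp [pvWsum, PySem.Dict.getD_insert, h, Ne.symm h]

theorem pvWfold_keys (L : List (Int × Int)) (d : PySem.Dict Int Int) :
    (pvWfold L d).keys = PySem.Set.update d.keys (L.map Prod.fst) :=
  PySem.Dict.keys_foldl_insert_key L Prod.fst _ d

theorem pvDictEq (d d' : PySem.Dict Int Int) (hk : d.keys = d'.keys) (hnd : d.keys.Nodup)
    (hg : ∀ k, d.getD k 0 = d'.getD k 0) : d.items = d'.items := by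
  rw [PySem.Dict.items_eq_map_keys d hnd 0, PySem.Dict.items_eq_map_keys d' (hk ▸ hnd) 0, ← hk]
  exact List.map_congr_left (fun k _ => by rw [hg k])

theorem pvUpdate_of_subset (s : PySem.Set Int) (v : List Int) (h : ∀ t ∈ v, t ∈ s) :
    PySem.Set.update s v = s := by
  rw [PySem.Set.update_eq_append_filter]
  have hnil : List.filter (fun y => !(PySem.Set.contains s y)) (PySem.Set.ofList v) = [] := by
    rw [List.filter_eq_nil_iff]
    intro y hy
    have hys : y ∈ s := h y (by simpa [PySem.Set.mem_ofList] using hy)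
    simpa using hys
  rw [hnil, List.append_nil]

theorem pvUpdate_flatMap_dedup (row : Int → List Int) (l : List Int) (s : PySem.Set Int)
    (sa : List Int) (H : ∀ x ∈ sa, ∀ t ∈ row x, t ∈ s) :
    PySem.Set.update s (l.flatMap row)
      = PySem.Set.update s ((pvSeenFilter sa l).flatMap row) := by
  induction l generalizing s sa with
  | nil => simp [pvSeenFilter]
  | cons x l ih =>
      by_cases hx : x ∈ sa
      · have hfil : pvSeenFilter sa (x :: l) = pvSeenFilter sa l := by
          simp only [pvSeenFilter, PySem.Set.ofList_cons, PySem.Set.discard, List.filter_cons,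
            List.filter_filter]
          have hx' : (!(decide (x ∈ sa))) = false := by simp [hx]
          rw [hx']
          simp only [Bool.false_eq_true, if_false]
          refine List.filter_congr ?_
          intro y _
          by_cases hyx : y = x
          · subst hyx; simp [hx]
          · simp [hyx]
        rw [hfil, List.flatMap_cons, PySem.Set.update_append,
          pvUpdate_of_subset s (row x) (H x hx)]
        exact ih s sa H
      · have hfil : pvSeenFilter sa (x :: l) = x :: pvSeenFilter (x :: sa) l := by
          simp only [pvSeenFilter, PySem.Set.ofList_cons, PySem.Set.discard, List.filter_cons,
            List.filter_filter]
          have hx' : (!(decide (x ∈ sa))) = true := by simp [hx]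
          rw [hx']
          simp only [if_true]
          congr 1
          refine List.filter_congr ?_
          intro y _
          by_cases hyx : y = x
          · subst hyx; simp
          · simp [hyx]
        rw [hfil, List.flatMap_cons, List.flatMap_cons, PySem.Set.update_append,
          PySem.Set.update_append]
        refine ih (PySem.Set.update s (row x)) (x :: sa) ?_
        intro x' hx' t ht
        rcases List.mem_cons.1 hx' with h1 | h1
        · subst h1; exact (PySem.Set.mem_update _ _ _).2 (Or.inr ht)
        · exact (PySem.Set.mem_update _ _ _).2 (Or.inl (H x' h1 t ht))

theorem pvUpdate_flatMap_ofList (row : Int → List Int) (l : List Int) (s : PySem.Set Int) :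
    PySem.Set.update s (l.flatMap row)
      = PySem.Set.update s ((PySem.Set.ofList l).flatMap row) := by
  have := pvUpdate_flatMap_dedup row l s [] (by simp)
  simpa [pvSeenFilter] using this

theorem pvUpdate_congr_rows (row1 row2 : Int → List Int)
    (h : ∀ (x : Int) (s : PySem.Set Int), PySem.Set.update s (row1 x) = PySem.Set.update s (row2 x))
    (l : List Int) (s : PySem.Set Int) :
    PySem.Set.update s (l.flatMap row1) = PySem.Set.update s (l.flatMap row2) := by
  induction l generalizing s with
  | nil => rfl
  | cons x l ih =>
      rw [List.flatMap_cons, List.flatMap_cons, PySem.Set.update_append,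
        PySem.Set.update_append, h x s]
      exact ih _

theorem pvRow_dedup (x : Int) (b : List Int) (s : PySem.Set Int) :
    PySem.Set.update s (b.map (fun y => x + y))
      = PySem.Set.update s ((PySem.Set.ofList b).map (fun y => x + y)) := by
  have h1 : ∀ l : List Int, l.map (fun y => x + y) = l.flatMap (fun y => [x + y]) := by
    intro l; induction l with
    | nil => rfl
    | cons z l ih => simp [ih]
  rw [h1, h1, pvUpdate_flatMap_ofList]

theorem pvKeysEq (a b : List Int) :
    PySem.Set.ofList ((pvL1 a b).map Prod.fst) = PySem.Set.ofList ((pvL2 a b).map Prod.fst) := by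
  have h1 : (pvL1 a b).map Prod.fst = a.flatMap (fun x => b.map (fun y => x + y)) := by
    simp [pvL1, List.map_flatMap, List.map_map, Function.comp_def]
  have h2 : (pvL2 a b).map Prod.fst
      = (PySem.Set.ofList a).flatMap (fun x => (PySem.Set.ofList b).map (fun y => x + y)) := by
    simp [pvL2, List.map_flatMap, List.map_map, Function.comp_def]
  rw [h1, h2, ← PySem.Set.update_nil_left, ← PySem.Set.update_nil_left,
    pvUpdate_flatMap_ofList,
    pvUpdate_congr_rows (fun x => b.map (fun y => x + y))
      (fun x => (PySem.Set.ofList b).map (fun y => x + y)) (fun x s => pvRow_dedup x b s)]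

theorem pvSumDiscard (s : List Int) (f : Int → Int) (x : Int) (hnd : s.Nodup) :
    (s.map f).sum = (if x ∈ s then f x else 0) + ((PySem.Set.discard s x).map f).sum := by
  induction s with
  | nil => simp [PySem.Set.discard]
  | cons y s ih =>
      have hnd' := hnd.of_cons
      by_cases hyx : y = x
      · subst hyx
        have hxs : y ∉ s := (List.nodup_cons.1 hnd).1
        have hd : PySem.Set.discard (y :: s) y = s := by
          simp only [PySem.Set.discard, List.filter_cons, beq_self_eq_true, Bool.not_true,
            Bool.false_eq_true, if_false]
          refine List.filter_eq_self.2 (fun z hz => ?_)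
          have hzy : z ≠ y := fun h => hxs (h ▸ hz)
          simp [hzy]
        simp [hd]
      · have hd : PySem.Set.discard (y :: s) x = y :: PySem.Set.discard s x := by
          simp [PySem.Set.discard, hyx]
        rw [hd]
        simp only [List.map_cons, List.sum_cons, List.mem_cons]
        rw [ih hnd']
        by_cases hxs : x ∈ s
        · simp [Ne.symm hyx, hxs]
          ring
        · simp [Ne.symm hyx, hxs]

theorem pvCountSum (l : List Int) (g : Int → Int) :
    (l.map g).sum = ((PySem.Set.ofList l).map (fun v => (l.count v : Int) * g v)).sum := by
  induction l with
  | nil => simp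
  | cons x l ih =>
      rw [PySem.Set.ofList_cons]
      simp only [List.map_cons, List.sum_cons]
      have hmem : ∀ v ∈ PySem.Set.discard (PySem.Set.ofList l) x, v ≠ x := by
        intro v hv
        exact ((PySem.Set.mem_discard _ _ _).1 hv).2
      have hcongr : (PySem.Set.discard (PySem.Set.ofList l) x).map
            (fun v => ((x :: l).count v : Int) * g v)
          = (PySem.Set.discard (PySem.Set.ofList l) x).map (fun v => (l.count v : Int) * g v) := by
        refine List.map_congr_left ?_
        intro v hv
        rw [List.count_cons_of_ne (Ne.symm (hmem v hv))]
      rw [hcongr]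
      have hsplit := pvSumDiscard (PySem.Set.ofList l) (fun v => (l.count v : Int) * g v) x
        (PySem.Set.nodup_ofList l)
      rw [← ih] at hsplit
      have hcx : ((x :: l).count x : Int) = (l.count x : Int) + 1 := by
        rw [List.count_cons_self]; push_cast; ring
      rw [hcx]
      by_cases hx : x ∈ l
      · rw [hsplit]; simp [PySem.Set.mem_ofList, hx]; ring
      · have : l.count x = 0 := List.count_eq_zero.2 hx
        rw [hsplit]; simp [PySem.Set.mem_ofList, hx, this]

-- sum distributes over flatMap (no named Mathlib lemma found for this shape)
theorem pvSumFlatMap {α : Type} (l : List α) (f : α → List Int) :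
    (l.flatMap f).sum = (l.map (fun x => (f x).sum)).sum := by
  induction l with
  | nil => rfl
  | cons x l ih => simp [List.flatMap_cons, ih]

theorem pvWsumL1 (a b : List Int) (s : Int) :
    pvWsum (pvL1 a b) s
      = (a.map (fun x => (b.map (fun y => if x + y = s then (1 : Int) else 0)).sum)).sum := by
  simp [pvWsum, pvL1, List.map_flatMap, List.map_map, Function.comp_def, pvSumFlatMap]

theorem pvWsumL2 (a b : List Int) (s : Int) :
    pvWsum (pvL2 a b) s
      = ((PySem.Set.ofList a).map (fun x => ((PySem.Set.ofList b).map
          (fun y => if x + y = s then (a.count x : Int) * (b.count y : Int) else 0)).sum)).sum := by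
  simp [pvWsum, pvL2, List.map_flatMap, List.map_map, Function.comp_def, pvSumFlatMap]

theorem pvWsumEq (a b : List Int) (s : Int) : pvWsum (pvL1 a b) s = pvWsum (pvL2 a b) s := by
  rw [pvWsumL1, pvWsumL2]
  rw [pvCountSum a (fun x => (b.map (fun y => if x + y = s then (1 : Int) else 0)).sum)]
  refine congrArg List.sum (List.map_congr_left ?_)
  intro x _
  rw [pvCountSum b (fun y => if x + y = s then (1 : Int) else 0)]
  rw [← List.sum_map_mul_left]
  refine congrArg List.sum (List.map_congr_left ?_)
  intro y _
  by_cases h : x + y = s <;> simp [h]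

theorem pvMainDict (a b : List Int) :
    (pvWfold (pvL1 a b) PySem.Dict.empty).items = (pvWfold (pvL2 a b) PySem.Dict.empty).items := by
  have hk1 : (pvWfold (pvL1 a b) PySem.Dict.empty).keys
      = PySem.Set.ofList ((pvL1 a b).map Prod.fst) := by
    rw [pvWfold_keys, PySem.Dict.keys_empty, PySem.Set.update_nil_left]
  have hk2 : (pvWfold (pvL2 a b) PySem.Dict.empty).keys
      = PySem.Set.ofList ((pvL2 a b).map Prod.fst) := by
    rw [pvWfold_keys, PySem.Dict.keys_empty, PySem.Set.update_nil_left]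
  refine pvDictEq _ _ ?_ ?_ ?_
  · rw [hk1, hk2, pvKeysEq]
  · rw [hk1]; exact PySem.Set.nodup_ofList _
  · intro k
    rw [pvWfold_getD, pvWfold_getD, PySem.Dict.getD_empty, pvWsumEq]

-- ===== VERDICT (by name: the statement is the Claim_ definition above) =====
theorem count_2_lists_element_sums_spec : Claim_equal_count_2_lists_element_sums := by
  intro a b _
  show count_2_lists_element_sums a b = count_2_lists_element_sums_alt a b
  rw [pvA_eq, pvB_eq]
  exact pvMainDict a b
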